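-- pv_equiv track=rewrite | github.com/rafaelolal/citadel-externship | week_one/splatter.py | splatter
-- ===== SOURCE A (Python) =====
-- def splatter(matrix):
--     zeros = []
--     for i in range(len(matrix)):
--         for j in range(len(matrix[0])):
--             if matrix[i][j] == 0:
--                 zeros.append((i, j))
--
--     for zero in zeros:
--         for i in range(len(matrix)):
--             if i == zero[0]:
--                 continue
--             matrix[i][zero[1]] += 1
--
--         for j in range(len(matrix[0])):
--             if j == zero[1]:
--                 continue
--             matrix[zero[0]][j] += 1
--
--     return matrix
-- ===== SOURCE B (Python) =====
-- # B mutates `matrix` in place like A (same observable side effect); instead of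
-- # sweeping a whole row and column per zero, it precomputes per-row / per-column
-- # zero counts once and applies the closed-form increment to each cell.
-- def splatter(matrix):
--     if not matrix:
--         return matrix
--     n = len(matrix[0])
--     row_zeros = [row[:n].count(0) for row in matrix]
--     col_zeros = [sum(row[j] == 0 for row in matrix) for j in range(n)]
--     for rz, row in zip(row_zeros, matrix):
--         for j in range(n):
--             row[j] += rz + col_zeros[j] - (2 if row[j] == 0 else 0)
--     return matrix
-- ===== Notes on version B (the rewrite author's own statement) =====
-- stated objective: alternative
-- what changed: Instead of collecting all zero positions and then sweeping a whole row and a whole column per zero, B precomputes per-row and per-column zero counts once and applies the closed-form increment row_zeros[i]+col_zeros[j]-2*(cell==0) to each cell in a single pass; on zero-sparse inputs this is not measurably faster in practice.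
import Mathlib
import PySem

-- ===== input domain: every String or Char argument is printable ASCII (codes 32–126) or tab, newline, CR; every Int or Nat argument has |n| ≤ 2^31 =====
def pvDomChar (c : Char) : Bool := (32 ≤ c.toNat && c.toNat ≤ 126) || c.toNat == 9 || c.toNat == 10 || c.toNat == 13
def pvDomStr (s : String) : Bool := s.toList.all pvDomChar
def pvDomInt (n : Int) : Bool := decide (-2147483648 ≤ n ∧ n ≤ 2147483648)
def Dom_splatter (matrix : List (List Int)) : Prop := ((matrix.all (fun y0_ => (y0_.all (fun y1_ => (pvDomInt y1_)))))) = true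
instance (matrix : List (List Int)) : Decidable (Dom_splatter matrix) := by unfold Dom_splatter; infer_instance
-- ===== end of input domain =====

-- Both programs mutate `matrix` in place; the equivalence proved here is about the
-- returned value (the mutated matrix in both).  B replaces A's per-zero row+column
-- sweeps by one closed-form pass over the cells using row/column zero counts.

-- ===== PORT A =====
-- matrix[i][j] ported as nested getD with default 1 (≠ 0): under Pre_ every access
-- A performs is in range, so the default is never seen.
def pyCell (m : List (List Int)) (i j : Nat) : Int := (m.getD i []).getD j 1

def splatter (matrix : List (List Int)) : List (List Int) :=
  let zeros : List (Nat × Nat) :=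
    (List.range matrix.length).foldl (fun acc i =>
      (List.range (matrix.headD []).length).foldl (fun acc j =>
        if pyCell matrix i j == 0 then acc ++ [(i, j)] else acc) acc) []
  zeros.foldl (fun m z =>
    let m1 := (List.range m.length).foldl
      (fun m i => if i = z.1 then m else m.modify i (fun row => row.modify z.2 (· + 1))) m
    (List.range (m1.headD []).length).foldl
      (fun m j => if j = z.2 then m else m.modify z.1 (fun row => row.modify j (· + 1))) m1)
    matrix

-- ===== PORT B =====
def splatter_alt (matrix : List (List Int)) : List (List Int) :=
  if matrix = [] then matrix
  else
    let n := (matrix.headD []).length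
    let rowZeros : List Int := matrix.map (fun row => (PySem.List.count (row.take n) 0 : Int))
    let colZeros : List Int := (List.range n).map (fun j =>
      matrix.foldl (fun s row => s + (if row.getD j 1 == 0 then 1 else 0)) 0)
    (rowZeros.zip matrix).map (fun p =>
      (List.range n).foldl (fun row j =>
        row.modify j (fun v => v + p.1 + colZeros.getD j 0 - (if v == 0 then 2 else 0))) p.2)

-- ===== PRECONDITION & SPEC =====
-- Pre_ excludes exactly the inputs on which A (and B) raise IndexError:
-- a row shorter than row 0 (A indexes every row up to len(matrix[0])).
def Pre_splatter (matrix : List (List Int)) : Prop :=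
  ∀ row ∈ matrix, (matrix.headD []).length ≤ row.length
instance (matrix : List (List Int)) : Decidable (Pre_splatter matrix) := by
  unfold Pre_splatter; infer_instance

def pvWitness_splatter : List (List Int) := [[0, 1], [2, 0]]

def Spec_splatter (matrix : List (List Int)) (out : List (List Int)) : Prop := out = splatter_alt matrix
instance (matrix : List (List Int)) (out : List (List Int)) : Decidable (Spec_splatter matrix out) := by unfold Spec_splatter; infer_instance

-- ===== CLAIM (what is proved, stated in full; the proofs are below) =====
def Claim_equal_splatter : Prop := ∀ (matrix : List (List Int)), Dom_splatter matrix → Pre_splatter matrix → Spec_splatter matrix (splatter matrix)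

-- ===== LEMMAS AND PROOFS =====

/-- length of row `k` (0 for a missing row). -/
def rowLen (m : List (List Int)) (k : Nat) : Nat := (m.getD k []).length

/-- `m` has the same shape (row count and row lengths) as `M`. -/
def matShape (m M : List (List Int)) : Prop := m.length = M.length ∧ ∀ k, rowLen m k = rowLen M k

/-- contribution of one zero position `z` to cell `(i,j)` in A's sweep (`n` = width). -/
def dz (n : Nat) (z : Nat × Nat) (i j : Nat) : Int :=
  (if ¬ i = z.1 ∧ j = z.2 then 1 else 0) + (if i = z.1 ∧ j < n ∧ ¬ j = z.2 then 1 else 0)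

def deltaZ (n : Nat) (zs : List (Nat × Nat)) (i j : Nat) : Int := (zs.map (fun z => dz n z i j)).sum

/-- A's first phase: the scanned list of zero positions. -/
def zerosOf (matrix : List (List Int)) : List (Nat × Nat) :=
  (List.range matrix.length).foldl (fun acc i =>
    (List.range (matrix.headD []).length).foldl (fun acc j =>
      if pyCell matrix i j == 0 then acc ++ [(i, j)] else acc) acc) []

/-- A's per-zero step (column sweep then row sweep). -/
def stepA (m : List (List Int)) (z : Nat × Nat) : List (List Int) :=
  let m1 := (List.range m.length).foldl
    (fun m i => if i = z.1 then m else m.modify i (fun row => row.modify z.2 (· + 1))) m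
  (List.range (m1.headD []).length).foldl
    (fun m j => if j = z.2 then m else m.modify z.1 (fun row => row.modify j (· + 1))) m1

def colB (a b : Nat) (m : List (List Int)) (k : Nat) : List (List Int) :=
  (List.range k).foldl (fun m i => if i = a then m else m.modify i (fun row => row.modify b (· + 1))) m

def rowB (a b : Nat) (m : List (List Int)) (k : Nat) : List (List Int) :=
  (List.range k).foldl (fun m j => if j = b then m else m.modify a (fun row => row.modify j (· + 1))) m

lemma splatter_eq (M : List (List Int)) : splatter M = (zerosOf M).foldl stepA M := rfl

lemma headD_len (m : List (List Int)) : (m.headD []).length = rowLen m 0 := by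
  cases m <;> rfl

lemma getD_modify {α : Type} (l : List α) (a : Nat) (f : α → α) (k : Nat) (d : α) :
    (l.modify a f).getD k d = if a = k ∧ k < l.length then f (l.getD k d) else l.getD k d := by
  by_cases h : k < l.length
  · rw [List.getD_eq_getElem?_getD, List.getElem?_modify, List.getElem?_eq_getElem h,
        List.getD_eq_getElem?_getD, List.getElem?_eq_getElem h]
    by_cases hak : a = k <;> simp [hak, h]
  · have h' : l.length ≤ k := Nat.le_of_not_lt h
    rw [List.getD_eq_getElem?_getD, List.getElem?_modify, List.getElem?_eq_none h',
        List.getD_eq_getElem?_getD, List.getElem?_eq_none h']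
    simp [h]

lemma pyCell_modify2 (m : List (List Int)) (a b : Nat) (f : Int → Int) (i j : Nat) :
    pyCell (m.modify a (fun row => row.modify b f)) i j =
      if a = i ∧ b = j ∧ i < m.length ∧ j < rowLen m i then f (pyCell m i j) else pyCell m i j := by
  unfold pyCell rowLen
  rw [getD_modify]
  by_cases h1 : a = i ∧ i < m.length
  · obtain ⟨ha, hi⟩ := h1
    subst ha
    rw [if_pos ⟨rfl, hi⟩, getD_modify]
    split_ifs <;> tauto
  · rw [if_neg h1, if_neg (by tauto)]

lemma shape_modify2 (m : List (List Int)) (a b : Nat) (f : Int → Int) :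
    matShape (m.modify a (fun row => row.modify b f)) m := by
  refine ⟨List.length_modify .., fun k => ?_⟩
  unfold rowLen
  rw [getD_modify]
  split_ifs with h
  · exact List.length_modify ..
  · rfl

lemma matShape_trans {m1 m2 m3 : List (List Int)} (h1 : matShape m1 m2) (h2 : matShape m2 m3) :
    matShape m1 m3 := ⟨h1.1.trans h2.1, fun k => (h1.2 k).trans (h2.2 k)⟩

lemma colB_succ (a b : Nat) (m : List (List Int)) (k : Nat) :
    colB a b m (k + 1) =
      (if k = a then colB a b m k else (colB a b m k).modify k (fun row => row.modify b (· + 1))) := by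
  rw [colB, List.range_succ, List.foldl_append]
  rfl

lemma rowB_succ (a b : Nat) (m : List (List Int)) (k : Nat) :
    rowB a b m (k + 1) =
      (if k = b then rowB a b m k else (rowB a b m k).modify a (fun row => row.modify k (· + 1))) := by
  rw [rowB, List.range_succ, List.foldl_append]
  rfl

lemma colB_shape (a b : Nat) (m : List (List Int)) (k : Nat) : matShape (colB a b m k) m := by
  induction k with
  | zero => exact ⟨rfl, fun _ => rfl⟩
  | succ k ih =>
    rw [colB_succ]
    split_ifs with h
    · exact ih
    · exact matShape_trans (shape_modify2 ..) ih

lemma colB_cell (a b : Nat) (m : List (List Int)) (k : Nat) (i j : Nat)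
    (hk : k ≤ m.length) (hb : ∀ t, t < m.length → b < rowLen m t) :
    pyCell (colB a b m k) i j = pyCell m i j + (if i < k ∧ ¬ i = a ∧ j = b then 1 else 0) := by
  induction k with
  | zero => simp [colB]
  | succ k ih =>
    have hkm : k < m.length := by omega
    have ih' := ih (by omega)
    rw [colB_succ]
    by_cases hka : k = a
    · rw [if_pos hka, ih']
      subst hka
      congr 1
      split_ifs <;> omega
    · rw [if_neg hka, pyCell_modify2]
      have hsh := colB_shape a b m k
      simp only [hsh.1, hsh.2, ih']
      by_cases hik : i = k
      · subst hik
        by_cases hjb : b = j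
        · subst hjb
          rw [if_pos ⟨rfl, rfl, by omega, hb i (by omega)⟩]
          split_ifs <;> omega
        · rw [if_neg (fun h => hjb h.2.1)]
          split_ifs <;> omega
      · rw [if_neg (fun h => hik h.1.symm)]
        split_ifs <;> omega

lemma rowB_shape (a b : Nat) (m : List (List Int)) (k : Nat) : matShape (rowB a b m k) m := by
  induction k with
  | zero => exact ⟨rfl, fun _ => rfl⟩
  | succ k ih =>
    rw [rowB_succ]
    split_ifs with h
    · exact ih
    · exact matShape_trans (shape_modify2 ..) ih

lemma rowB_cell (a b : Nat) (m : List (List Int)) (k : Nat) (i j : Nat)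
    (ha : a < m.length) (hk : k ≤ rowLen m a) :
    pyCell (rowB a b m k) i j = pyCell m i j + (if i = a ∧ j < k ∧ ¬ j = b then 1 else 0) := by
  induction k with
  | zero => simp [rowB]
  | succ k ih =>
    have ih' := ih (by omega)
    rw [rowB_succ]
    by_cases hkb : k = b
    · rw [if_pos hkb, ih']
      subst hkb
      congr 1
      split_ifs <;> omega
    · rw [if_neg hkb, pyCell_modify2]
      have hsh := rowB_shape a b m k
      simp only [hsh.1, hsh.2, ih']
      by_cases hia : a = i
      · subst hia
        by_cases hjk : k = j
        · subst hjk
          rw [if_pos ⟨rfl, rfl, ha, by omega⟩]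
          split_ifs <;> omega
        · rw [if_neg (fun h => hjk h.2.1)]
          split_ifs <;> omega
      · rw [if_neg (fun h => hia h.1)]
        split_ifs <;> omega

lemma stepA_props (M m : List (List Int)) (z : Nat × Nat) (hsh : matShape m M)
    (hpre : ∀ t, t < M.length → rowLen M 0 ≤ rowLen M t)
    (hz1 : z.1 < M.length) (hz2 : z.2 < rowLen M 0) :
    matShape (stepA m z) M ∧ ∀ i j, i < M.length → j < rowLen M i →
      pyCell (stepA m z) i j = pyCell m i j + dz (rowLen M 0) z i j := by
  have hstep : stepA m z =
      rowB z.1 z.2 (colB z.1 z.2 m m.length) (((colB z.1 z.2 m m.length).headD []).length) := rfl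
  have hcs : matShape (colB z.1 z.2 m m.length) M := matShape_trans (colB_shape ..) hsh
  have hlen : ((colB z.1 z.2 m m.length).headD []).length = rowLen M 0 := by
    rw [headD_len]; exact hcs.2 0
  rw [hstep, hlen]
  refine ⟨matShape_trans (rowB_shape ..) hcs, fun i j hi hj => ?_⟩
  have hbB : ∀ t, t < m.length → z.2 < rowLen m t := by
    intro t ht
    rw [hsh.2]
    exact lt_of_lt_of_le hz2 (hpre t (by rw [← hsh.1]; exact ht))
  rw [rowB_cell _ _ _ _ _ _ (by rw [hcs.1]; exact hz1) (by rw [hcs.2]; exact hpre _ hz1)]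
  rw [colB_cell _ _ _ _ _ _ (le_refl m.length) hbB]
  have him : i < m.length := by rw [hsh.1]; exact hi
  unfold dz
  split_ifs <;> omega

lemma foldA_props (M : List (List Int)) (hpre : ∀ t, t < M.length → rowLen M 0 ≤ rowLen M t) :
    ∀ (zs : List (Nat × Nat)) (m : List (List Int)), matShape m M →
      (∀ z ∈ zs, z.1 < M.length ∧ z.2 < rowLen M 0) →
      matShape (zs.foldl stepA m) M ∧ ∀ i j, i < M.length → j < rowLen M i →
        pyCell (zs.foldl stepA m) i j = pyCell m i j + deltaZ (rowLen M 0) zs i j := by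
  intro zs
  induction zs with
  | nil => exact fun m hsh _ => ⟨hsh, fun i j hi hj => by simp [deltaZ]⟩
  | cons z zs ih =>
    intro m hsh hb
    have hz := hb z List.mem_cons_self
    obtain ⟨h1, h2⟩ := stepA_props M m z hsh hpre hz.1 hz.2
    obtain ⟨ih1, ih2⟩ := ih (stepA m z) h1 (fun w hw => hb w (List.mem_cons_of_mem _ hw))
    refine ⟨ih1, fun i j hi hj => ?_⟩
    rw [List.foldl_cons, ih2 i j hi hj, h2 i j hi hj]
    unfold deltaZ
    simp only [List.map_cons, List.sum_cons]
    ring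

lemma zerosOf_eq (M : List (List Int)) :
    zerosOf M = (List.range M.length).flatMap (fun a =>
      ((List.range (rowLen M 0)).filter (fun b => pyCell M a b == 0)).map (fun b => (a, b))) := by
  unfold zerosOf
  rw [headD_len]
  have h1 : ∀ (i : Nat) (acc : List (Nat × Nat)),
      (List.range (rowLen M 0)).foldl
          (fun acc j => if pyCell M i j == 0 then acc ++ [(i, j)] else acc) acc
        = acc ++ ((List.range (rowLen M 0)).filter (fun b => pyCell M i b == 0)).map
            (fun b => (i, b)) :=
    fun i acc => PySem.List.foldl_append_if _ _ _ _
  simp only [h1]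
  rw [PySem.List.foldl_append_eq_flatMap]
  simp

lemma zerosOf_bounds (M : List (List Int)) :
    ∀ z ∈ zerosOf M, z.1 < M.length ∧ z.2 < rowLen M 0 := by
  intro z hz
  rw [zerosOf_eq] at hz
  simp only [List.mem_flatMap, List.mem_map, List.mem_filter, List.mem_range] at hz
  obtain ⟨a, ha, b, ⟨hb, _⟩, rfl⟩ := hz
  exact ⟨ha, hb⟩

lemma sum_indicator (l : List Nat) (hl : l.Nodup) (j : Nat) :
    (l.map (fun b => if j = b then (1 : Int) else 0)).sum = if j ∈ l then 1 else 0 := by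
  induction l with
  | nil => simp
  | cons a l ih =>
    rcases List.nodup_cons.mp hl with ⟨ha, hl'⟩
    simp only [List.map_cons, List.sum_cons, ih hl', List.mem_cons]
    by_cases h : j = a
    · subst h
      simp [ha]
    · simp [h]

lemma sum_anti_indicator (l : List Nat) (hl : l.Nodup) (j : Nat) :
    (l.map (fun b => if j = b then (0 : Int) else 1)).sum = l.length - (if j ∈ l then 1 else 0) := by
  induction l with
  | nil => simp
  | cons a l ih =>
    rcases List.nodup_cons.mp hl with ⟨ha, hl'⟩
    simp only [List.map_cons, List.sum_cons, ih hl', List.length_cons, List.mem_cons]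
    by_cases h : j = a
    · subst h
      rw [if_pos rfl, if_neg ha, if_pos (Or.inl rfl)]
      push_cast
      ring
    · rw [if_neg h]
      by_cases hm : j ∈ l
      · rw [if_pos hm, if_pos (Or.inr hm)]
        push_cast
        ring
      · rw [if_neg hm, if_neg (by tauto)]
        push_cast
        ring

lemma sum_single (L i : Nat) (c : Int) (h : i < L) :
    ((List.range L).map (fun a => if a = i then c else 0)).sum = c := by
  induction L with
  | zero => exact absurd h (Nat.not_lt_zero i)
  | succ L ih =>
    rw [List.range_succ, List.map_append, List.sum_append]
    by_cases hiL : i < L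
    · rw [ih hiL]
      simp only [List.map_cons, List.map_nil, List.sum_cons, List.sum_nil]
      rw [if_neg (show ¬ L = i by omega)]
      ring
    · have hi : L = i := by omega
      subst hi
      have h0 : ((List.range L).map (fun a => if a = L then c else 0)).sum = 0 := by
        apply List.sum_eq_zero
        intro x hx
        simp only [List.mem_map, List.mem_range] at hx
        obtain ⟨a, ha, rfl⟩ := hx
        rw [if_neg (show ¬ a = L by omega)]
      rw [h0]
      simp

lemma getD_eq_getElem' {α : Type} (l : List α) (d : α) {i : Nat} (h : i < l.length) :
    l.getD i d = l[i] := by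
  rw [List.getD_eq_getElem?_getD, List.getElem?_eq_getElem h]
  rfl

lemma deltaZ_zeros (M : List (List Int)) (i j : Nat) (hi : i < M.length) :
    deltaZ (rowLen M 0) (zerosOf M) i j =
      if j < rowLen M 0 then
        (((List.range (rowLen M 0)).countP (fun b => pyCell M i b == 0) : Int)
          + ((List.range M.length).map (fun a => if pyCell M a j == 0 then (1 : Int) else 0)).sum
          - (if pyCell M i j == 0 then 2 else 0))
      else 0 := by
  unfold deltaZ
  rw [zerosOf_eq, List.map_flatMap, List.flatMap_def, List.sum_flatten, List.map_map]
  simp only [Function.comp_def, List.map_map]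
  have key : ∀ a ∈ List.range M.length,
      ((((List.range (rowLen M 0)).filter (fun b => pyCell M a b == 0)).map
          (fun b => dz (rowLen M 0) (a, b) i j))).sum =
        (if j < rowLen M 0 ∧ (pyCell M a j == 0) = true then (1 : Int) else 0)
          + (if a = i then
              (if j < rowLen M 0 then
                (((List.range (rowLen M 0)).countP (fun b => pyCell M i b == 0) : Int)
                  - 2 * (if pyCell M i j == 0 then (1 : Int) else 0))
              else 0)
            else 0) := by
    intro a _
    by_cases hai : a = i
    · subst hai
      rw [if_pos rfl]
      by_cases hj : j < rowLen M 0
      · have hmap : ∀ b ∈ (List.range (rowLen M 0)).filter (fun b => pyCell M a b == 0),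
            dz (rowLen M 0) (a, b) a j = if j = b then 0 else 1 := by
          intro b _
          unfold dz
          split_ifs <;> omega
        rw [List.map_congr_left hmap,
            sum_anti_indicator _ (List.Nodup.filter _ List.nodup_range) j,
            ← List.countP_eq_length_filter]
        have hmem : (j ∈ (List.range (rowLen M 0)).filter (fun b => pyCell M a b == 0)) ↔
            (pyCell M a j == 0) = true := by
          simp [List.mem_filter, List.mem_range, hj]
        rw [if_pos hj]
        by_cases hz : (pyCell M a j == 0) = true
        · rw [if_pos (hmem.mpr hz), if_pos hz,
              if_pos (show j < rowLen M 0 ∧ (pyCell M a j == 0) = true from ⟨hj, hz⟩)]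
          ring
        · rw [if_neg (fun hh => hz (hmem.mp hh)), if_neg hz,
              if_neg (show ¬ (j < rowLen M 0 ∧ (pyCell M a j == 0) = true) from fun hh => hz hh.2)]
          ring
      · have hmap : ∀ b ∈ (List.range (rowLen M 0)).filter (fun b => pyCell M a b == 0),
            dz (rowLen M 0) (a, b) a j = 0 := by
          intro b hb
          have hbn : b < rowLen M 0 := by
            have := (List.mem_filter.mp hb).1
            simpa [List.mem_range] using this
          unfold dz
          split_ifs <;> omega
        rw [List.map_congr_left hmap, if_neg hj,
            if_neg (show ¬ (j < rowLen M 0 ∧ (pyCell M a j == 0) = true) from fun hh => hj hh.1)]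
        simp
    · rw [if_neg hai]
      have hmap : ∀ b ∈ (List.range (rowLen M 0)).filter (fun b => pyCell M a b == 0),
          dz (rowLen M 0) (a, b) i j = if j = b then 1 else 0 := by
        intro b _
        unfold dz
        split_ifs <;> omega
      rw [List.map_congr_left hmap,
          sum_indicator _ (List.Nodup.filter _ List.nodup_range) j]
      have hmem : (j ∈ (List.range (rowLen M 0)).filter (fun b => pyCell M a b == 0)) ↔
          (j < rowLen M 0 ∧ (pyCell M a j == 0) = true) := by
        simp only [List.mem_filter, List.mem_range]
      by_cases hin : j < rowLen M 0 ∧ (pyCell M a j == 0) = true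
      · rw [if_pos (hmem.mpr hin), if_pos hin]
        ring
      · rw [if_neg (fun hh => hin (hmem.mp hh)), if_neg hin]
        ring
  rw [List.map_congr_left key, PySem.List.sum_map_add_int,
      sum_single M.length i _ hi]
  by_cases hj : j < rowLen M 0
  · have hbase : ((List.range M.length).map
        (fun a => if j < rowLen M 0 ∧ (pyCell M a j == 0) = true then (1 : Int) else 0)) =
        ((List.range M.length).map (fun a => if pyCell M a j == 0 then (1 : Int) else 0)) := by
      apply List.map_congr_left
      intro a _
      simp [hj]
    rw [hbase, if_pos hj, if_pos hj]
    by_cases hz : (pyCell M i j == 0) = true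
    · rw [if_pos hz, if_pos hz]
      ring
    · rw [if_neg hz, if_neg hz]
      ring
  · have h0 : ((List.range M.length).map
        (fun a => if j < rowLen M 0 ∧ (pyCell M a j == 0) = true then (1 : Int) else 0)).sum = 0 := by
      apply List.sum_eq_zero
      intro x hx
      obtain ⟨a, _, rfl⟩ := List.mem_map.mp hx
      exact if_neg (fun hh => hj hh.1)
    rw [h0, if_neg hj, if_neg hj]
    simp

lemma map_eq_map_range (l : List (List Int)) (h : List Int → Int) :
    l.map h = (List.range l.length).map (fun a => h (l.getD a [])) := by
  apply List.ext_getElem (by simp)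
  intro k h1 h2
  simp only [List.getElem_map, List.getElem_range]
  rw [List.getD_eq_getElem?_getD, List.getElem?_eq_getElem (by simpa using h1)]
  rfl

lemma take_eq_map_range (row : List Int) (n : Nat) (hn : n ≤ row.length) :
    row.take n = (List.range n).map (fun b => row.getD b 1) := by
  apply List.ext_getElem (by simp [hn])
  intro k h1 h2
  have hk : k < row.length := lt_of_lt_of_le (by simpa using h2) hn
  simp only [List.getElem_take, List.getElem_map, List.getElem_range]
  rw [List.getD_eq_getElem?_getD, List.getElem?_eq_getElem hk]
  rfl

lemma rowFold_props (rz : Int) (cz : List Int) (row : List Int) (k : Nat) :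
    ((List.range k).foldl (fun row j =>
        row.modify j (fun v => v + rz + cz.getD j 0 - (if v == 0 then 2 else 0))) row).length = row.length ∧
    ∀ j, ((List.range k).foldl (fun row j =>
        row.modify j (fun v => v + rz + cz.getD j 0 - (if v == 0 then 2 else 0))) row).getD j 1 =
      if j < k ∧ j < row.length then
        row.getD j 1 + rz + cz.getD j 0 - (if row.getD j 1 == 0 then 2 else 0)
      else row.getD j 1 := by
  induction k with
  | zero => exact ⟨by simp, fun j => by simp⟩
  | succ k ih =>
    rw [List.range_succ, List.foldl_append, List.foldl_cons, List.foldl_nil]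
    refine ⟨by rw [List.length_modify]; exact ih.1, fun j => ?_⟩
    rw [getD_modify]
    simp only [ih.1]
    by_cases hkj : k = j
    · subst hkj
      by_cases hlt : k < row.length
      · rw [if_pos (show k = k ∧ k < row.length from ⟨rfl, hlt⟩), ih.2 k,
            if_neg (show ¬ (k < k ∧ k < row.length) by omega),
            if_pos (show k < k + 1 ∧ k < row.length from ⟨by omega, hlt⟩)]
      · rw [if_neg (show ¬ (k = k ∧ k < row.length) from fun h => hlt h.2), ih.2 k,
            if_neg (show ¬ (k < k ∧ k < row.length) by omega),
            if_neg (show ¬ (k < k + 1 ∧ k < row.length) from fun h => hlt h.2)]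
    · rw [if_neg (show ¬ (k = j ∧ j < row.length) from fun h => hkj h.1), ih.2 j]
      have hiff : (j < k ∧ j < row.length) ↔ (j < k + 1 ∧ j < row.length) := by omega
      rw [if_congr hiff rfl rfl]

-- ===== VERDICT (by name: the statement is the Claim_ definition above) =====
theorem splatter_spec : Claim_equal_splatter := by
  intro M _ hpre
  unfold Spec_splatter
  by_cases hM : M = []
  · subst hM
    rfl
  · have hpre' : ∀ t, t < M.length → rowLen M 0 ≤ rowLen M t := by
      intro t ht
      have hmem : M.getD t [] ∈ M := by
        rw [getD_eq_getElem' _ _ ht]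
        exact List.getElem_mem ht
      have h2 := hpre _ hmem
      rw [headD_len] at h2
      exact h2
    obtain ⟨hshA, hcellA⟩ := foldA_props M hpre' (zerosOf M) M ⟨rfl, fun _ => rfl⟩ (zerosOf_bounds M)
    rw [splatter_eq]
    have halt : splatter_alt M =
        ((M.map (fun row => ((PySem.List.count (row.take (rowLen M 0)) 0 : Nat) : Int))).zip M).map
          (fun p => (List.range (rowLen M 0)).foldl (fun row j =>
            row.modify j (fun v => v + p.1 + ((List.range (rowLen M 0)).map (fun j =>
              M.foldl (fun s row => s + (if row.getD j 1 == 0 then 1 else 0)) 0)).getD j 0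
              - (if v == 0 then 2 else 0))) p.2) := by
      simp only [splatter_alt, headD_len]
      rw [if_neg hM]
    rw [halt]
    have hlen : (List.foldl stepA M (zerosOf M)).length = M.length := hshA.1
    apply List.ext_getElem
    · rw [hlen]
      simp
    intro i h1 h2
    have hiM : i < M.length := by rw [← hlen]; exact h1
    have hMi : M.getD i [] = M[i] := getD_eq_getElem' _ _ hiM
    simp only [List.getElem_map, List.getElem_zip]
    obtain ⟨hBl, hBc⟩ := rowFold_props ((PySem.List.count ((M[i]).take (rowLen M 0)) 0 : Nat) : Int)
      ((List.range (rowLen M 0)).map (fun j =>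
        M.foldl (fun s row => s + (if row.getD j 1 == 0 then 1 else 0)) 0)) (M[i]) (rowLen M 0)
    have hrowM : rowLen M i = (M[i]).length := by
      unfold rowLen
      rw [hMi]
    have hrowlenA : (List.foldl stepA M (zerosOf M))[i].length = rowLen M i := by
      rw [← getD_eq_getElem' _ [] h1]
      exact hshA.2 i
    apply List.ext_getElem
    · rw [hrowlenA, hBl, hrowM]
    intro j hj1 hj2
    have hjM : j < rowLen M i := by rw [← hrowlenA]; exact hj1
    have hjrow : j < (M[i]).length := by rw [← hrowM]; exact hjM
    have hL : (List.foldl stepA M (zerosOf M))[i][j] = pyCell (List.foldl stepA M (zerosOf M)) i j := by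
      unfold pyCell
      rw [getD_eq_getElem' _ _ h1, getD_eq_getElem' _ _ hj1]
    rw [hL, hcellA i j hiM hjM, deltaZ_zeros M i j hiM,
        ← getD_eq_getElem' _ (1 : Int) hj2, hBc j]
    have hn_le : rowLen M 0 ≤ (M[i]).length := by
      rw [← hrowM]
      exact hpre' i hiM
    have hcnt : (PySem.List.count ((M[i]).take (rowLen M 0)) 0 : Nat) =
        (List.range (rowLen M 0)).countP (fun b => pyCell M i b == 0) := by
      have hfun : ((fun x => x == (0 : Int)) ∘ fun b => (M[i]).getD b 1) =
          fun b => pyCell M i b == 0 := by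
        funext b
        simp only [Function.comp_apply, pyCell]
        rw [hMi]
      rw [PySem.List.count_eq, take_eq_map_range _ _ hn_le, List.count_eq_countP,
          List.countP_map, hfun]
    have hcz : ∀ j', j' < rowLen M 0 →
        ((List.range (rowLen M 0)).map (fun j' =>
          M.foldl (fun s row => s + (if row.getD j' 1 == 0 then 1 else 0)) 0)).getD j' 0 =
        ((List.range M.length).map (fun a => if pyCell M a j' == 0 then (1 : Int) else 0)).sum := by
      intro j' hj'
      rw [getD_eq_getElem' _ _ (by simpa using hj')]
      simp only [List.getElem_map, List.getElem_range]
      rw [PySem.List.foldl_add, map_eq_map_range M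
        (fun row => if row.getD j' 1 == 0 then (1 : Int) else 0)]
      simp [pyCell]
    by_cases hjn : j < rowLen M 0
    · rw [if_pos hjn,
          if_pos (show j < rowLen M 0 ∧ j < (M[i]).length from ⟨hjn, hjrow⟩),
          hcz j hjn, ← hcnt]
      simp only [pyCell, hMi]
      ring
    · rw [if_neg hjn,
          if_neg (show ¬ (j < rowLen M 0 ∧ j < (M[i]).length) from fun hh => hjn hh.1)]
      simp only [pyCell]
      rw [hMi]
      ring
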